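-- pv_equiv track=rewrite | github.com/Seb-Good/ecg-features | features/full_waveform_features.py | calculate_decomposition_level
-- ===== SOURCE A (Python) =====
-- def calculate_decomposition_level(waveform_length, level):
--
--     # Set starting multiplication factor
--     factor = 0
--
--     # Set updated waveform length variable
--     waveform_length_updated = None
--
--     # If waveform is not the correct length for proposed decomposition level
--     if waveform_length % 2**level != 0:
--
--         # Calculate remainder
--         remainder = waveform_length % 2**level
--
--         # Loop through multiplication factors until minimum factor found
--         while remainder != 0:
--
--             # Update multiplication factor
--             factor += 1
--
--             # Update waveform length
--             waveform_length_updated = factor * waveform_length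
--
--             # Calculate updated remainder
--             remainder = waveform_length_updated % 2**level
--
--         return waveform_length_updated
--
--     # If waveform is the correct length for proposed decomposition level
--     else:
--         return waveform_length
-- ===== SOURCE B (Python) =====
-- def calculate_decomposition_level(waveform_length, level):
--     # Number-theoretic form: the answer is waveform_length * 2**(level - v2(waveform_length)).
--     needed = 2**level
--     if waveform_length % needed == 0:
--         return waveform_length
--     twos = 0
--     t = waveform_length
--     while t % 2 == 0:
--         t //= 2
--         twos += 1
--     return waveform_length * 2**(level - twos)
-- ===== Notes on version B (the rewrite author's own statement) =====
-- stated objective: alternative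
-- what changed: Replaces A's scan over successive multiples (factor=1,2,3,... until factor*L is divisible by 2**level) with a direct number-theoretic computation: count the factors of 2 in waveform_length by repeated halving and return waveform_length * 2**(level - count).
import Mathlib
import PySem

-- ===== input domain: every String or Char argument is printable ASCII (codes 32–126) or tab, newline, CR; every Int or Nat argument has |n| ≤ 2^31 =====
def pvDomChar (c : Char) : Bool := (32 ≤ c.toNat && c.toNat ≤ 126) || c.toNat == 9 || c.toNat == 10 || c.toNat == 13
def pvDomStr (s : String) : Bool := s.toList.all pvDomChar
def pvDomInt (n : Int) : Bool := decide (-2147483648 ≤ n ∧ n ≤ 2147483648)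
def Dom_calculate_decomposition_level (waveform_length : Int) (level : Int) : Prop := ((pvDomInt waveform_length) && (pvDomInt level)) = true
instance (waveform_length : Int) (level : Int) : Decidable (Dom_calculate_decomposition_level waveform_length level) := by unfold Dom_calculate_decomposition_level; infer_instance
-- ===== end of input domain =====

-- B computes the smallest aligned multiple directly from the 2-adic valuation of the
-- input instead of A's scan over successive multiples (objective: alternative algorithm).


-- ===== PORT A =====
-- A's while-loop: while remainder != 0: factor += 1; remainder = (factor*L) % m.
-- Fuel only makes the recursion total; with the fuel A is called with, the 0-fuel branch
-- is unreachable on inputs satisfying Pre_ (proved below).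
def pvALoop (L m : Int) (factor remainder : Int) (fuel : Nat) : Int :=
  if remainder = 0 then factor * L
  else
    match fuel with
    | 0 => factor * L
    | fuel + 1 => pvALoop L m (factor + 1) (PySem.Int.mod ((factor + 1) * L) m) fuel

def calculate_decomposition_level (waveform_length : Int) (level : Int) : Int :=
  -- 2**level: for 0 ≤ level this is exactly Python's 2**level; for -1074 ≤ level < 0 Python's
  -- 2**level is a nonzero float power of two and L % 2**level == 0.0 for every int L, so A
  -- returns L — which the toNat clamp (m = 1, remainder 0) reproduces exactly on all of Pre_.
  let m : Int := 2 ^ level.toNat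
  if PySem.Int.mod waveform_length m ≠ 0 then
    pvALoop waveform_length m 0 (PySem.Int.mod waveform_length m) (2 ^ level.toNat)
  else
    waveform_length

-- ===== PORT B =====
-- B's while-loop: while t % 2 == 0: t //= 2; twos += 1.  Fuel t.natAbs is enough
-- (the loop is only entered with t ≠ 0, and |t| halves each step).
def pvBLoop (t : Int) (twos : Nat) (fuel : Nat) : Nat :=
  match fuel with
  | 0 => twos
  | fuel + 1 =>
    if PySem.Int.mod t 2 = 0 then pvBLoop (PySem.Int.floordiv t 2) (twos + 1) fuel
    else twos

def calculate_decomposition_level_alt (waveform_length : Int) (level : Int) : Int :=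
  -- 2**level: same float-path remark as in port A; the toNat clamp is exact on all of Pre_.
  let needed : Int := 2 ^ level.toNat
  if PySem.Int.mod waveform_length needed = 0 then
    waveform_length
  else
    -- level - twos: on Pre_ this is nonnegative (twos < level here), so Nat subtraction is exact
    waveform_length * 2 ^ (level.toNat - pvBLoop waveform_length 0 waveform_length.natAbs)

-- ===== PRECONDITION & SPEC =====
-- Pre_ excludes exactly level ≤ -1075, where Python's float 2**level underflows to 0.0 and
-- A raises ZeroDivisionError (for -1074 ≤ level < 0 the float modulo is exactly 0.0 and A returns).
def Pre_calculate_decomposition_level (waveform_length : Int) (level : Int) : Prop := -1074 ≤ level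
instance (waveform_length : Int) (level : Int) : Decidable (Pre_calculate_decomposition_level waveform_length level) := by unfold Pre_calculate_decomposition_level; infer_instance

def pvWitness_calculate_decomposition_level : Int × Int := (6, 3)

def Spec_calculate_decomposition_level (waveform_length : Int) (level : Int) (out : Int) : Prop := out = calculate_decomposition_level_alt waveform_length level
instance (waveform_length : Int) (level : Int) (out : Int) : Decidable (Spec_calculate_decomposition_level waveform_length level out) := by unfold Spec_calculate_decomposition_level; infer_instance

-- ===== CLAIM (what is proved, stated in full; the proofs are below) =====
def Claim_equal_calculate_decomposition_level : Prop := ∀ (waveform_length : Int) (level : Int), Dom_calculate_decomposition_level waveform_length level → Pre_calculate_decomposition_level waveform_length level → Spec_calculate_decomposition_level waveform_length level (calculate_decomposition_level waveform_length level)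

-- ===== LEMMAS AND PROOFS =====

theorem pvBLoop_step (t : Int) (v fuel : Nat) (h : PySem.Int.mod t 2 = 0) :
    pvBLoop t v (fuel + 1) = pvBLoop (PySem.Int.floordiv t 2) (v + 1) fuel := by
  rw [pvBLoop.eq_def]; simp only [if_pos h]

theorem pvBLoop_stop (t : Int) (v fuel : Nat) (h : ¬ PySem.Int.mod t 2 = 0) :
    pvBLoop t v (fuel + 1) = v := by
  rw [pvBLoop.eq_def]; simp only [if_neg h]

theorem pvALoop_step (L m factor r : Int) (fuel : Nat) (hr : r ≠ 0) :
    pvALoop L m factor r (fuel + 1)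
      = pvALoop L m (factor + 1) (PySem.Int.mod ((factor + 1) * L) m) fuel := by
  rw [pvALoop.eq_def]; simp only [if_neg hr]

theorem pvALoop_stop (L m factor r : Int) (fuel : Nat) (hr : r = 0) :
    pvALoop L m factor r fuel = factor * L := by
  rw [pvALoop.eq_def]; simp only [if_pos hr]

-- B's loop computes the 2-adic valuation: 2^result exactly divides t.
theorem pvBLoop_spec (fuel : Nat) : ∀ (t : Int) (v : Nat), t ≠ 0 → t.natAbs ≤ fuel →
    ∃ k, pvBLoop t v fuel = v + k ∧ (2 : Int) ^ k ∣ t ∧ ¬ (2 : Int) ^ (k + 1) ∣ t := by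
  induction fuel with
  | zero => intro t v ht hle; exact absurd (Int.natAbs_pos.mpr ht) (by omega)
  | succ fuel ih =>
    intro t v ht hle
    by_cases h2 : PySem.Int.mod t 2 = 0
    · have hdvd : (2 : Int) ∣ t := (PySem.Int.mod_eq_zero_iff_dvd t 2).mp h2
      have hfd : PySem.Int.floordiv t 2 = t / 2 := PySem.Int.floordiv_eq_ediv_of_pos (by norm_num)
      have ht2 : t / 2 ≠ 0 := by
        intro h0
        have := Int.ediv_mul_cancel hdvd
        rw [h0] at this; simp at this; exact ht this.symm
      have habs : (t / 2).natAbs ≤ fuel := by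
        have h2le : 2 ≤ t.natAbs := by
          rcases hdvd with ⟨c, rfl⟩
          have hc : c ≠ 0 := by rintro rfl; simp at ht
          have : 1 ≤ c.natAbs := Int.natAbs_pos.mpr hc
          simp [Int.natAbs_mul]; omega
        have hhalf : (t / 2).natAbs = t.natAbs / 2 := by
          rcases hdvd with ⟨c, rfl⟩
          rw [Int.mul_ediv_cancel_left _ (by norm_num)]
          simp [Int.natAbs_mul]
        omega
      obtain ⟨k, hk, hdk, hndk⟩ := ih (t / 2) (v + 1) ht2 habs
      refine ⟨k + 1, ?_, ?_, ?_⟩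
      · rw [pvBLoop_step t v fuel h2, hfd, hk]
        all_goals omega
      · rcases hdk with ⟨c, hc⟩
        exact ⟨c, by rw [pow_succ, mul_comm ((2:Int)^k) 2, mul_assoc, ← hc,
          Int.mul_ediv_cancel' hdvd]⟩
      · rintro ⟨c, hc⟩
        refine hndk ⟨c, ?_⟩
        rw [hc, show (2:Int) ^ (k + 1 + 1) * c = 2 * (2 ^ (k + 1) * c) by ring,
          Int.mul_ediv_cancel_left _ (by norm_num)]
    · refine ⟨0, ?_, ?_, ?_⟩
      · rw [pvBLoop_stop t v fuel h2]
        all_goals omega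
      · simp
      · intro hd
        exact h2 ((PySem.Int.mod_eq_zero_iff_dvd t 2).mpr (by simpa using hd))

-- A's loop returns f * L where f is the least positive factor with m ∣ f*L.
theorem pvALoop_spec (L m f : Int)
    (hf0 : PySem.Int.mod (f * L) m = 0)
    (hmin : ∀ g : Int, 0 < g → g < f → PySem.Int.mod (g * L) m ≠ 0) :
    ∀ (fuel : Nat) (factor r : Int), r ≠ 0 → 0 ≤ factor → factor < f →
      (f - factor).toNat ≤ fuel → pvALoop L m factor r fuel = f * L := by
  intro fuel
  induction fuel with
  | zero => intro factor r hr h0 hlt hle; omega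
  | succ fuel ih =>
    intro factor r hr h0 hlt hle
    rw [pvALoop_step L m factor r fuel hr]
    by_cases heq : factor + 1 = f
    · rw [heq, pvALoop_stop L m f _ fuel hf0]
    · have hlt' : factor + 1 < f := by omega
      exact ih (factor + 1) _ (hmin (factor + 1) (by omega) hlt') (by omega) hlt' (by omega)

theorem two_pow_mod_zero_iff (n : Nat) (x : Int) :
    PySem.Int.mod x (2 ^ n) = 0 ↔ (2 : Int) ^ n ∣ x :=
  PySem.Int.mod_eq_zero_iff_dvd x (2 ^ n)

-- ===== VERDICT (by name: the statement is the Claim_ definition above) =====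
theorem calculate_decomposition_level_spec : Claim_equal_calculate_decomposition_level := by
  intro L level _hdom _hpre
  unfold Spec_calculate_decomposition_level calculate_decomposition_level calculate_decomposition_level_alt
  set n := level.toNat with hn
  set m : Int := 2 ^ n with hm
  by_cases h0 : PySem.Int.mod L m = 0
  · rw [if_neg (not_not_intro h0), if_pos h0]
  · rw [if_pos h0, if_neg h0]
    have hL0 : L ≠ 0 := by
      rintro rfl
      exact h0 ((two_pow_mod_zero_iff n 0).mpr (dvd_zero _))
    obtain ⟨k, hk, hdk, hndk⟩ := pvBLoop_spec L.natAbs L 0 hL0 le_rfl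
    have hkn : k < n := by
      by_contra hge
      exact h0 ((two_pow_mod_zero_iff n L).mpr (dvd_trans (pow_dvd_pow 2 (by omega)) hdk))
    obtain ⟨q, hq⟩ := hdk
    have hqodd : ¬ (2 : Int) ∣ q := by
      rintro ⟨c, rfl⟩
      exact hndk ⟨c, by rw [hq]; ring⟩
    set f : Int := 2 ^ (n - k) with hf
    have hfpos : 0 < f := by positivity
    have hfup : PySem.Int.mod (f * L) m = 0 := by
      rw [hm, two_pow_mod_zero_iff]
      refine ⟨q, ?_⟩
      rw [hq, hf, show (2:Int) ^ n = 2 ^ (n - k) * 2 ^ k by rw [← pow_add]; congr 1; omega]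
      ring
    have hmin : ∀ g : Int, 0 < g → g < f → PySem.Int.mod (g * L) m ≠ 0 := by
      intro g hg hgf hmod
      rw [hm, two_pow_mod_zero_iff, hq] at hmod
      have hdvd' : (2 : Int) ^ (n - k) ∣ g * q := by
        rcases hmod with ⟨c, hc⟩
        refine ⟨c, ?_⟩
        have h2k : ((2:Int) ^ k) ≠ 0 := by positivity
        apply mul_left_cancel₀ h2k
        calc (2:Int) ^ k * (g * q) = g * (2 ^ k * q) := by ring
          _ = 2 ^ n * c := hc
          _ = 2 ^ k * (2 ^ (n - k) * c) := by rw [← mul_assoc, ← pow_add]; congr 2; omega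
      have hcop : IsCoprime ((2 : Int) ^ (n - k)) q := by
        apply IsCoprime.pow_left
        rw [Int.isCoprime_iff_gcd_eq_one]
        rcases Int.even_or_odd q with he | ho
        · exact absurd he.two_dvd hqodd
        · rcases ho with ⟨j, hj⟩
          subst hj
          simp [Int.gcd]
      have hfg : f ∣ g := hcop.dvd_of_dvd_mul_right hdvd'
      have := Int.le_of_dvd hg hfg
      omega
    have hrun : pvALoop L m 0 (PySem.Int.mod L m) (2 ^ n) = f * L := by
      apply pvALoop_spec L m f hfup hmin (2 ^ n) 0 _ h0 le_rfl hfpos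
      have hle : f ≤ (2 : Int) ^ n := pow_le_pow_right₀ (by norm_num) (by omega)
      have h2n : ((2:Int) ^ n).toNat = 2 ^ n := by
        rw [show ((2:Int) ^ n) = ((2 ^ n : Nat) : Int) by push_cast; ring]
        exact Int.toNat_natCast _
      omega
    rw [hrun, hk]
    all_goals simp only [Nat.zero_add]
    all_goals ring
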